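-- pv_equiv track=rewrite | github.com/MrBrantCode/unitest_baseline | mut_generate/mist_train_cf/cf_56796/solution.py | singular_occurrences
-- ===== SOURCE A (Python) =====
-- def singular_occurrences(matrix):
--     # Initialize an empty dictionary
--     output_dict = {}
--
--     # Go through each element, capture its value and its location
--     for i in range(len(matrix)):  # i represents the depth
--         for j in range(len(matrix[i])):  # j represents the row
--             for k in range(len(matrix[i][j])):  # k represents the column
--                 element = matrix[i][j][k]
--
--                 if element not in output_dict.values():
--                     # If an element is not already in dictionary values,
--                     # add its location and value to the dictionary
--                     location = (i, j, k)
--                     output_dict[location] = element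
--                 else:
--                     # If there's a recurring element,
--                     # find its key and remove it from the dictionary
--                     for key, value in output_dict.items():
--                         if value == element:
--                             del output_dict[key]
--                             break
--
--     return output_dict
-- ===== SOURCE B (Python) =====
-- def singular_occurrences(matrix):
--     # One counting pass (counts per value + last location per value),
--     # then one emitting pass keeping odd-count values at their last location.
--     counts = {}
--     last = {}
--     for i, plane in enumerate(matrix):
--         for j, row in enumerate(plane):
--             for k, v in enumerate(row):
--                 counts[v] = counts.get(v, 0) + 1
--                 last[v] = (i, j, k)
--     out = {}
--     for i, plane in enumerate(matrix):
--         for j, row in enumerate(plane):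
--             for k, v in enumerate(row):
--                 if counts[v] % 2 == 1 and last[v] == (i, j, k):
--                     out[(i, j, k)] = v
--     return out
-- ===== Notes on version B (the rewrite author's own statement) =====
-- stated objective: faster
-- what changed: Replaces A's toggle dict with its O(size-of-dict) values()-membership scan and items()-scan deletion per element by two linear passes: one pass builds a count table and a last-location table per value, a second pass emits each element exactly when its total count is odd and its position is the value's last occurrence, which reproduces A's dict (keys, values and insertion order) exactly.
import Mathlib
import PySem

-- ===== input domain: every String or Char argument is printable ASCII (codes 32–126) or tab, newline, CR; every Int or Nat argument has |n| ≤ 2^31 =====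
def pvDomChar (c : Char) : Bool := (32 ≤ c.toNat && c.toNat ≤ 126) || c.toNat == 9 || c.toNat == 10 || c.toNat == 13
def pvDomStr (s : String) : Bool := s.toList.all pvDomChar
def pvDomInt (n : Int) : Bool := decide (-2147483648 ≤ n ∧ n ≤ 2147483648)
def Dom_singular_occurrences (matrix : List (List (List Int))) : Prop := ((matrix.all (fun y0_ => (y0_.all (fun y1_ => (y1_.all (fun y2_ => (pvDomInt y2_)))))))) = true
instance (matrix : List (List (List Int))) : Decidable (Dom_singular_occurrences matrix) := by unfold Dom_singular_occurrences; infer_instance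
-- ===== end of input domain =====

-- B replaces A's quadratic values()-membership/items()-scan toggle dict with two linear passes
-- (a count table and a last-location table, then an emit pass); proved to return the same dict.

-- ===== PORT A =====
-- 'for i in range(len(matrix))' with 'matrix[i]' is ported as a fold over enumerate matrix — the
-- same (index, element) pairs in the same order.  output_dict is an insertion-ordered assoc list:
-- every inserted key (i, j, k) is a fresh distinct triple, so Python's dict insert is append; the
-- 'for key, value in items(): if value == element: del; break' loop deletes the first entry whose
-- value equals element, which is List.eraseP — exact here since keys are unique.
def singular_occurrences (matrix : List (List (List Int))) : List (Int × Int × Int × Int) :=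
  let d := (PySem.List.enumerate matrix).foldl (fun d ip =>
    (PySem.List.enumerate ip.2).foldl (fun d jp =>
      (PySem.List.enumerate jp.2).foldl (fun d kp =>
        if ((d.map (fun kv => kv.2)).contains kp.2) = false then
          d ++ [((ip.1, jp.1, kp.1), kp.2)]
        else
          d.eraseP (fun kv => kv.2 == kp.2)) d) d) ([] : List ((Int × Int × Int) × Int))
  d.map (fun kv => (kv.1.1, kv.1.2.1, kv.1.2.2, kv.2))

-- ===== PORT B =====
-- Pass 1 carries the pair (counts, last) through the triple enumerate loop.  In pass 2 the Python
-- lookups counts[v] and last[v] never raise (v was counted in pass 1); counts[v] is ported as getD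
-- (exact, the key is present) and 'last[v] == (i, j, k)' as 'get? == some (i, j, k)' (exact there).
def singular_occurrences_alt (matrix : List (List (List Int))) : List (Int × Int × Int × Int) :=
  let cl := (PySem.List.enumerate matrix).foldl (fun cl ip =>
    (PySem.List.enumerate ip.2).foldl (fun cl jp =>
      (PySem.List.enumerate jp.2).foldl (fun cl kp =>
        (cl.1.insert kp.2 (cl.1.getD kp.2 0 + 1), cl.2.insert kp.2 (ip.1, jp.1, kp.1))) cl) cl)
    ((PySem.Dict.empty, PySem.Dict.empty) : PySem.Dict Int Int × PySem.Dict Int (Int × Int × Int))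
  let out := (PySem.List.enumerate matrix).foldl (fun out ip =>
    (PySem.List.enumerate ip.2).foldl (fun out jp =>
      (PySem.List.enumerate jp.2).foldl (fun out kp =>
        if (PySem.Int.mod (cl.1.getD kp.2 0) 2 == 1) && (cl.2.get? kp.2 == some (ip.1, jp.1, kp.1)) then
          out.insert (ip.1, jp.1, kp.1) kp.2
        else out) out) out) (PySem.Dict.empty : PySem.Dict (Int × Int × Int) Int)
  out.items.map (fun kv => (kv.1.1, kv.1.2.1, kv.1.2.2, kv.2))

-- ===== PRECONDITION & SPEC =====
def Spec_singular_occurrences (matrix : List (List (List Int))) (out : List (Int × Int × Int × Int)) : Prop := out = singular_occurrences_alt matrix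
instance (matrix : List (List (List Int))) (out : List (Int × Int × Int × Int)) : Decidable (Spec_singular_occurrences matrix out) := by unfold Spec_singular_occurrences; infer_instance

-- ===== CLAIM (what is proved, stated in full; the proofs are below) =====
def Claim_equal_singular_occurrences : Prop := ∀ (matrix : List (List (List Int))), Dom_singular_occurrences matrix → Spec_singular_occurrences matrix (singular_occurrences matrix)

-- ===== LEMMAS AND PROOFS =====

-- The flattened event stream: one ((i, j, k), value) pair per element, in traversal order.
def pvEvs (matrix : List (List (List Int))) : List ((Int × Int × Int) × Int) :=
  (PySem.List.enumerate matrix).flatMap (fun ip =>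
    (PySem.List.enumerate ip.2).flatMap (fun jp =>
      (PySem.List.enumerate jp.2).map (fun kp => ((ip.1, jp.1, kp.1), kp.2))))

-- A's loop body, on one event.
def pvTog (d : List ((Int × Int × Int) × Int)) (e : (Int × Int × Int) × Int) :
    List ((Int × Int × Int) × Int) :=
  if ((d.map (fun kv => kv.2)).contains e.2) = false then d ++ [e]
  else d.eraseP (fun kv => kv.2 == e.2)

-- location of the last occurrence of value v in the event stream
def pvLast (E : List ((Int × Int × Int) × Int)) (v : Int) : Option (Int × Int × Int) :=
  (E.reverse.find? (fun kv => kv.2 == v)).map (fun kv => kv.1)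

-- the surviving events: odd total count and last occurrence
def pvKeep (E : List ((Int × Int × Int) × Int)) (kv : (Int × Int × Int) × Int) : Bool :=
  ((E.map (fun x => x.2)).count kv.2 % 2 == 1) && (pvLast E kv.2 == some kv.1)

def pvFlat (kv : (Int × Int × Int) × Int) : Int × Int × Int × Int :=
  (kv.1.1, kv.1.2.1, kv.1.2.2, kv.2)

lemma pvA_flat (m : List (List (List Int))) :
    singular_occurrences m = ((pvEvs m).foldl pvTog []).map pvFlat := by
  simp only [singular_occurrences, pvEvs, List.foldl_flatMap, List.foldl_map, pvTog]
  rfl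

lemma pvLast_append (E : List ((Int × Int × Int) × Int)) (e : (Int × Int × Int) × Int) (v : Int) :
    pvLast (E ++ [e]) v = if e.2 == v then some e.1 else pvLast E v := by
  simp only [pvLast, List.reverse_append, List.reverse_singleton, List.singleton_append,
    List.find?_cons]
  cases h : e.2 == v with
  | true => simp
  | false => simp

lemma pvCount_append (E : List ((Int × Int × Int) × Int)) (e : (Int × Int × Int) × Int) (v : Int) :
    ((E ++ [e]).map (fun x => x.2)).count v
      = (E.map (fun x => x.2)).count v + (if e.2 == v then 1 else 0) := by
  simp [List.count_append, List.count_singleton]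

-- nodup keys ⇒ at most one surviving event per value
lemma pvKeep_unique (E : List ((Int × Int × Int) × Int))
    (h : (E.map (fun kv => kv.1)).Nodup) :
    ∀ a ∈ E.filter (pvKeep E), ∀ b ∈ E.filter (pvKeep E), a.2 = b.2 → a = b := by
  intro a ha b hb hv
  rw [List.mem_filter] at ha hb
  have ha2 := (Bool.and_eq_true _ _).mp ha.2
  have hb2 := (Bool.and_eq_true _ _).mp hb.2
  have h1 : pvLast E a.2 = some a.1 := by simpa using ha2.2
  have h2 : pvLast E b.2 = some b.1 := by simpa using hb2.2
  rw [hv, h2] at h1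
  exact List.inj_on_of_nodup_map h ha.1 hb.1 (by simpa using h1.symm)

-- odd count ⇔ a surviving event with that value exists
lemma pvContains_iff (E : List ((Int × Int × Int) × Int)) (v : Int) :
    (((E.filter (pvKeep E)).map (fun kv => kv.2)).contains v = true)
      ↔ (E.map (fun x => x.2)).count v % 2 = 1 := by
  constructor
  · intro h
    rcases List.mem_map.mp (List.mem_of_elem_eq_true h) with ⟨kv, hkv, hv⟩
    rw [List.mem_filter] at hkv
    have := ((Bool.and_eq_true _ _).mp hkv.2).1
    subst hv
    simpa using this
  · intro hodd
    have hpos : 0 < (E.map (fun x => x.2)).count v := by omega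
    have hmem : v ∈ E.map (fun x => x.2) := List.count_pos_iff.mp hpos
    have hmem' : ∃ kv ∈ E.reverse, kv.2 = v := by
      rcases List.mem_map.mp hmem with ⟨kv, hkv, hv⟩
      exact ⟨kv, List.mem_reverse.mpr hkv, hv⟩
    rcases hmem' with ⟨kv0, hkv0, hv0⟩
    have hfind : (E.reverse.find? (fun kv => kv.2 == v)).isSome :=
      List.find?_isSome.mpr ⟨kv0, hkv0, by simp [hv0]⟩
    rcases Option.isSome_iff_exists.mp hfind with ⟨w, hw⟩
    have hwmem : w ∈ E := List.mem_reverse.mp (List.mem_of_find?_eq_some hw)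
    have hwv : w.2 = v := by simpa using List.find?_some hw
    have hwkeep : pvKeep E w = true := by
      simp only [pvKeep, Bool.and_eq_true, beq_iff_eq]
      refine ⟨by rw [hwv]; simpa using hodd, ?_⟩
      simp [pvLast, hwv, hw]
    exact List.elem_eq_true_of_mem (List.mem_map.mpr
      ⟨w, List.mem_filter.mpr ⟨hwmem, hwkeep⟩, hwv⟩)

-- erasing the first match equals filtering when the match is unique
lemma pvErase_eq_filter {α : Type} (l : List α) (q : α → Bool) (hn : l.Nodup)
    (hu : ∀ a ∈ l, ∀ b ∈ l, q a = true → q b = true → a = b) :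
    l.eraseP q = l.filter (fun x => !q x) := by
  induction l with
  | nil => rfl
  | cons c t ih =>
    cases hq : q c with
    | true =>
      have ht : t.filter (fun x => !q x) = t.filter (fun _ => true) := by
        apply List.filter_congr
        intro x hx
        cases hqx : q x with
        | true =>
          exact absurd (hu x (List.mem_cons_of_mem _ hx) c List.mem_cons_self hqx hq ▸ hx)
            (List.nodup_cons.mp hn).1
        | false => rfl
      simp [hq, ht]
    | false =>
      have := ih (List.nodup_cons.mp hn).2
        (fun a ha b hb => hu a (List.mem_cons_of_mem _ ha) b (List.mem_cons_of_mem _ hb))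
      simp [hq, this]

-- THE CORE LEMMA: A's toggle fold keeps exactly the odd-count last occurrences, in order.
lemma pvTog_eq_filter (E : List ((Int × Int × Int) × Int)) :
    (E.map (fun kv => kv.1)).Nodup → E.foldl pvTog [] = E.filter (pvKeep E) := by
  induction E using List.reverseRecOn with
  | nil => intro _; rfl
  | append_singleton E e ih =>
    intro h
    rw [List.map_append] at h
    obtain ⟨hE, -, hdisj⟩ := List.nodup_append.mp h
    have hp : e.1 ∉ E.map (fun kv => kv.1) := fun hm => hdisj e.1 hm e.1 (by simp) rfl
    rw [List.foldl_append, List.foldl_cons, List.foldl_nil, ih hE, List.filter_append]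
    -- an old event of E survives in E ++ [e] iff it survived in E and its value is not e.2
    have hR1 : E.filter (pvKeep (E ++ [e]))
        = (E.filter (pvKeep E)).filter (fun kv => !(kv.2 == e.2)) := by
      rw [List.filter_filter]
      apply List.filter_congr
      intro kv hkv
      simp only [pvKeep, pvCount_append, pvLast_append]
      cases heq : e.2 == kv.2 with
      | true =>
        rw [beq_iff_eq] at heq
        have hne : kv.1 ≠ e.1 := fun hc => hp (hc ▸ List.mem_map.mpr ⟨kv, hkv, rfl⟩)
        have hbe : (kv.2 == e.2) = true := beq_iff_eq.mpr heq.symm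
        simp [heq, Ne.symm hne]
      | false =>
        have hne : e.2 ≠ kv.2 := beq_eq_false_iff_ne.mp heq
        have hbe : (kv.2 == e.2) = false := beq_eq_false_iff_ne.mpr (Ne.symm hne)
        simp [hbe]
    rw [hR1]
    -- the new event survives iff its count in E was even
    cases hodd : ((E.map (fun x => x.2)).count e.2 % 2 == 1) with
    | false =>
      have h1 : ((((E.map (fun x => x.2)).count e.2 + 1) % 2 == 1)) = true := by
        rw [beq_eq_false_iff_ne] at hodd; rw [beq_iff_eq]; omega
      have hR2 : [e].filter (pvKeep (E ++ [e])) = [e] := by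
        simp [pvKeep, pvLast_append, h1]
      rw [hR2]
      -- even count: e.2 is not among the surviving values, so A appends
      have hcont : (((E.filter (pvKeep E)).map (fun kv => kv.2)).contains e.2) = false := by
        cases hc : ((E.filter (pvKeep E)).map (fun kv => kv.2)).contains e.2 with
        | false => rfl
        | true =>
          have := (pvContains_iff E e.2).mp hc
          rw [beq_eq_false_iff_ne] at hodd
          omega
      have hself : (E.filter (pvKeep E)).filter (fun kv => !(kv.2 == e.2)) = E.filter (pvKeep E) := by
        apply List.filter_eq_self.mpr
        intro kv hkv
        rw [List.mem_filter] at hkv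
        have hkodd := ((Bool.and_eq_true _ _).mp hkv.2).1
        cases hv : kv.2 == e.2 with
        | false => rfl
        | true =>
          rw [beq_iff_eq] at hv hkodd
          rw [hv] at hkodd
          rw [beq_eq_false_iff_ne] at hodd
          omega
      simp only [pvTog, if_pos hcont, hself]
    | true =>
      have h1 : ((((E.map (fun x => x.2)).count e.2 + 1) % 2 == 1)) = false := by
        rw [beq_iff_eq] at hodd; rw [beq_eq_false_iff_ne]; omega
      have hR2 : [e].filter (pvKeep (E ++ [e])) = [] := by
        simp [pvKeep, pvLast_append, h1]
      rw [hR2, List.append_nil]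
      -- odd count: exactly one surviving entry carries e.2, and A deletes it
      have hcont : (((E.filter (pvKeep E)).map (fun kv => kv.2)).contains e.2) = true :=
        (pvContains_iff E e.2).mpr (by simpa using hodd)
      simp only [pvTog, hcont, Bool.true_eq_false, if_false]
      apply pvErase_eq_filter
      · exact ((List.filter_sublist).nodup (List.Nodup.of_map _ hE))
      · intro a ha b hb hqa hqb
        rw [beq_iff_eq] at hqa hqb
        exact pvKeep_unique E hE a ha b hb (hqa.trans hqb.symm)

-- B's last-location dict looks up the last occurrence
lemma pvLst_get (E : List ((Int × Int × Int) × Int)) (v : Int) :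
    (E.foldl (fun d kv => d.insert kv.2 kv.1)
        (PySem.Dict.empty : PySem.Dict Int (Int × Int × Int))).get? v = pvLast E v := by
  induction E using List.reverseRecOn with
  | nil => simp [pvLast, PySem.Dict.get?_empty]
  | append_singleton E e ih =>
    rw [List.foldl_append, List.foldl_cons, List.foldl_nil, PySem.Dict.get?_insert,
      pvLast_append]
    by_cases hv : v = e.2
    · rw [if_pos hv, beq_iff_eq.mpr hv.symm, if_pos rfl]
    · rw [if_neg hv, beq_eq_false_iff_ne.mpr (Ne.symm hv), if_neg (by simp), ih]

-- B's condition is the keep-condition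
lemma pvB_cond (E : List ((Int × Int × Int) × Int)) (kv : (Int × Int × Int) × Int) :
    ((PySem.Int.mod ((E.foldl (fun d x => d.insert x.2 (d.getD x.2 0 + 1))
          (PySem.Dict.empty : PySem.Dict Int Int)).getD kv.2 0) 2 == 1)
      && ((E.foldl (fun d x => d.insert x.2 x.1)
          (PySem.Dict.empty : PySem.Dict Int (Int × Int × Int))).get? kv.2 == some kv.1))
      = pvKeep E kv := by
  have hc : (E.foldl (fun d x => d.insert x.2 (d.getD x.2 0 + 1))
      (PySem.Dict.empty : PySem.Dict Int Int)).getD kv.2 0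
      = ((E.map (fun x => x.2)).count kv.2 : Int) := by
    have hfm := List.foldl_map (f := fun x : (Int × Int × Int) × Int => x.2)
      (g := fun (d : PySem.Dict Int Int) z => d.insert z (d.getD z 0 + 1))
      (l := E) (init := (PySem.Dict.empty : PySem.Dict Int Int))
    rw [← hfm, PySem.Dict.getD_foldl_insert_add_one]
    simp
  rw [hc, pvLst_get, pvKeep]
  congr 1
  have h2 : (2 : Int) = ((2 : Nat) : Int) := rfl
  rw [h2, PySem.Int.mod_natCast]
  cases hodd : (E.map (fun x => x.2)).count kv.2 % 2 == 1 with
  | true => simp_all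
  | false =>
    simp only [beq_eq_false_iff_ne] at hodd
    simpa using (by omega : ¬ (((E.map (fun x => x.2)).count kv.2 % 2 : Nat) : Int) = 1)

lemma pvB_flat (m : List (List (List Int))) (h : ((pvEvs m).map (fun kv => kv.1)).Nodup) :
    singular_occurrences_alt m = ((pvEvs m).filter (pvKeep (pvEvs m))).map pvFlat := by
  -- flatten B's nested loops into single folds over the event stream
  have hstep : singular_occurrences_alt m
      = ((pvEvs m).foldl (fun out kv =>
          if ((PySem.Int.mod (((pvEvs m).foldl (fun cl x =>
                  (cl.1.insert x.2 (cl.1.getD x.2 0 + 1), cl.2.insert x.2 x.1))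
                  ((PySem.Dict.empty, PySem.Dict.empty) :
                    PySem.Dict Int Int × PySem.Dict Int (Int × Int × Int))).1.getD kv.2 0) 2 == 1)
              && (((pvEvs m).foldl (fun cl x =>
                  (cl.1.insert x.2 (cl.1.getD x.2 0 + 1), cl.2.insert x.2 x.1))
                  ((PySem.Dict.empty, PySem.Dict.empty) :
                    PySem.Dict Int Int × PySem.Dict Int (Int × Int × Int))).2.get? kv.2 == some kv.1))
          then out.insert kv.1 kv.2 else out)
        (PySem.Dict.empty : PySem.Dict (Int × Int × Int) Int)).items.map pvFlat := by
    simp only [singular_occurrences_alt, pvEvs, List.foldl_flatMap, List.foldl_map]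
    rfl
  have hC := PySem.List.foldl_prod_mk
    (f := fun (d : PySem.Dict Int Int) (x : (Int × Int × Int) × Int) =>
      d.insert x.2 (d.getD x.2 0 + 1))
    (g := fun (d : PySem.Dict Int (Int × Int × Int)) (x : (Int × Int × Int) × Int) =>
      d.insert x.2 x.1)
    (l := pvEvs m) (a := PySem.Dict.empty) (b := PySem.Dict.empty)
  rw [hstep, hC]
  -- replace the loop condition by the keep-condition
  simp only [pvB_cond (pvEvs m)]
  -- a fold inserting under a filter is the fold over the filtered list
  rw [← List.foldl_filter]
  -- all inserted keys are fresh and distinct, so the dict's items are exactly the filtered events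
  have hnd : (((pvEvs m).filter (pvKeep (pvEvs m))).map (fun kv => kv.1)).Nodup :=
    ((List.filter_sublist).map _).nodup h
  have hfresh := PySem.Dict.items_foldl_insert_fresh
    ((pvEvs m).filter (pvKeep (pvEvs m))) (fun kv => kv.1) (fun kv => kv.2)
    (PySem.Dict.empty : PySem.Dict (Int × Int × Int) Int)
    (fun a _ => PySem.Dict.contains_empty _) hnd
  rw [hfresh]
  simp [PySem.Dict.empty]

-- keys of the event stream are distinct
lemma pvNodup_keys (m : List (List (List Int))) :
    ((pvEvs m).map (fun kv => kv.1)).Nodup := by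
  rw [pvEvs]
  simp only [List.map_flatMap, List.map_map, Function.comp_def]
  rw [List.nodup_flatMap]
  constructor
  · intro ip _
    rw [List.nodup_flatMap]
    constructor
    · intro jp _
      have hsplit : (fun kp : Int × Int => (ip.1, jp.1, kp.1))
          = (fun k : Int => (ip.1, jp.1, k)) ∘ (fun kp : Int × Int => kp.1) := rfl
      rw [hsplit, ← List.map_map, PySem.List.map_fst_enumerate]
      exact (PySem.List.nodup_pyRange_one _ _).map
        (fun a b hab => by simpa using congrArg (fun p : Int × Int × Int => p.2.2) hab)
    · have hnd : (PySem.List.enumerate ip.2).Pairwise (fun a b => a.1 ≠ b.1) := by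
        have h1 := PySem.List.nodup_pyRange_one 0 (0 + (ip.2.length : Int))
        rw [← PySem.List.map_fst_enumerate] at h1
        exact List.pairwise_map.mp h1
      refine hnd.imp ?_
      intro a b hne x hx1 hx2
      simp only [List.mem_map] at hx1 hx2
      rcases hx1 with ⟨kp, _, rfl⟩
      rcases hx2 with ⟨kp2, _, heq⟩
      have hba : b.1 = a.1 := by simpa using congrArg (fun p : Int × Int × Int => p.2.1) heq
      exact hne hba.symm
  · have hnd : (PySem.List.enumerate m).Pairwise (fun a b => a.1 ≠ b.1) := by
      have h1 := PySem.List.nodup_pyRange_one 0 (0 + (m.length : Int))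
      rw [← PySem.List.map_fst_enumerate] at h1
      exact List.pairwise_map.mp h1
    refine hnd.imp ?_
    intro a b hne x hx1 hx2
    simp only [List.mem_flatMap, List.mem_map] at hx1 hx2
    rcases hx1 with ⟨jp, _, kp, _, rfl⟩
    rcases hx2 with ⟨jp2, _, kp2, _, heq⟩
    have hba : b.1 = a.1 := by simpa using congrArg (fun p : Int × Int × Int => p.1) heq
    exact hne hba.symm

-- ===== VERDICT (by name: the statement is the Claim_ definition above) =====
theorem singular_occurrences_spec : Claim_equal_singular_occurrences := by
  intro m _
  show singular_occurrences m = singular_occurrences_alt m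
  rw [pvA_flat, pvB_flat m (pvNodup_keys m), pvTog_eq_filter _ (pvNodup_keys m)]
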